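-- pv_equiv track=rewrite | github.com/lake041/sesac-algorithm | 최성혁/프로그래머스/고득점 Kit/힙/더 맵게.py | solution
-- ===== SOURCE A (Python) =====
-- def solution(scoville, K):
--     scoville.sort()
--     mix_count = 0
--
--     while scoville[0] < K:
--         if len(scoville) < 2:
--             return -1
--
--         first = scoville.pop(0)
--         second = scoville.pop(0)
--         new_scoville = first + (second * 2)
--         scoville.insert(0, new_scoville)
--         scoville.sort()
--         mix_count += 1
--
--     return mix_count
-- ===== SOURCE B (Python) =====
-- def _merge(a, b):
--     # leftist-heap merge; a heap is None or (rank, value, left, right)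
--     if a is None:
--         return b
--     if b is None:
--         return a
--     if b[1] < a[1]:
--         a, b = b, a
--     l = a[2]
--     r = _merge(a[3], b)
--     rl = l[0] if l is not None else 0
--     rr = r[0] if r is not None else 0
--     if rl < rr:
--         l, r = r, l
--         rl, rr = rr, rl
--     return (rr + 1, a[1], l, r)
--
--
-- def solution(scoville, K):
--     h = None
--     for s in scoville:
--         h = _merge((1, s, None, None), h)
--     n = len(scoville)
--     count = 0
--     while h[1] < K:
--         if n < 2:
--             return -1
--         a = h[1]
--         h = _merge(h[2], h[3])
--         b = h[1]
--         h = _merge(h[2], h[3])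
--         h = _merge((1, a + 2 * b, None, None), h)
--         n -= 1
--         count += 1
--     return count
-- ===== Notes on version B (the rewrite author's own statement) =====
-- stated objective: faster
-- what changed: B replaces A's sorted list with two pop(0)s and a full re-sort per mixing by a hand-rolled leftist min-heap (merge-based), popping the two minima and pushing the combined value in O(log n) per mixing.
import Mathlib
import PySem

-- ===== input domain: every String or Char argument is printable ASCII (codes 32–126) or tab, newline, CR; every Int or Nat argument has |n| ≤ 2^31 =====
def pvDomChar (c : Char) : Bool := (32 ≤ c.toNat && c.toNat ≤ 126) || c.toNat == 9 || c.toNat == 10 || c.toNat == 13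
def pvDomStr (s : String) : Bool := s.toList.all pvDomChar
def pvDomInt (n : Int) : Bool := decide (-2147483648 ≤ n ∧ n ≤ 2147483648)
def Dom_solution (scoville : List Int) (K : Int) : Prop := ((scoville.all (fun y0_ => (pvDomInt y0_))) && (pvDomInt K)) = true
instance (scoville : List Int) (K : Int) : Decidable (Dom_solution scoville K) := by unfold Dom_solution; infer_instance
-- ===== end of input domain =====

-- B replaces A's sorted list (two pop(0)s + full re-sort per mixing) by a hand-rolled
-- leftist min-heap: pop the two minima, push the combined value, O(log n) per mixing.
-- A sorts its argument in place (a caller-visible mutation); the equivalence proved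
-- here is about the return value only.

-- ===== PORT A =====
-- A's while loop: pop the two smallest, re-insert first+second*2 at the front, re-sort.
-- On the empty list Python A raises IndexError (scoville[0]); Pre_ excludes it,
-- the Lean branch for [] is never reached under Pre_.
-- needed by solutionLoopA's termination proof
theorem loopA_dec (x y : Int) (rest2 : List Int) :
    (PySem.List.sorted ((x + y * 2) :: rest2) (fun z => z) false).length < (x :: y :: rest2).length := by
  rw [PySem.List.length_sorted]; exact Nat.lt_succ_self _

def solutionLoopA (xs : List Int) (K : Int) (cnt : Int) : Int :=
  match xs with
  | [] => 0
  | x :: rest =>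
    if x < K then
      if (x :: rest).length < 2 then -1
      else
        match rest with
        | [] => -1
        | y :: rest2 =>
          solutionLoopA (PySem.List.sorted ((x + y * 2) :: rest2) (fun z => z) false) K (cnt + 1)
    else cnt
termination_by xs.length
decreasing_by exact loopA_dec x y rest2

def solution (scoville : List Int) (K : Int) : Int :=
  solutionLoopA (PySem.List.sorted scoville (fun z => z) false) K 0

-- ===== PORT B =====
-- Source B's heap: None -> .leaf, a tuple (rank, value, left, right) -> .node
inductive LHeap : Type
  | leaf : LHeap
  | node : Int → Int → LHeap → LHeap → LHeap
deriving DecidableEq, Repr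

-- Source B's "l[0] if l is not None else 0"
def lrank : LHeap → Int
  | .leaf => 0
  | .node k _ _ _ => k

-- element count, used only for the termination measure of the Lean recursions
def lsize : LHeap → Nat
  | .leaf => 0
  | .node _ _ l r => 1 + lsize l + lsize r

-- the tail of _merge: rank comparison, child swap, new node (Source B's last 5 lines)
def lmk (v : Int) (l r : LHeap) : LHeap :=
  if lrank l < lrank r then .node (lrank l + 1) v r l else .node (lrank r + 1) v l r

-- needed by lmerge's termination proof
theorem lmerge_dec1 (ka va : Int) (la ra : LHeap) (kb vb : Int) (lb rb : LHeap) :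
    lsize rb + lsize (.node ka va la ra) < lsize (.node ka va la ra) + lsize (.node kb vb lb rb) := by
  simp only [lsize]; omega

-- needed by lmerge's termination proof
theorem lmerge_dec2 (ka va : Int) (la ra : LHeap) (kb vb : Int) (lb rb : LHeap) :
    lsize ra + lsize (.node kb vb lb rb) < lsize (.node ka va la ra) + lsize (.node kb vb lb rb) := by
  simp only [lsize]; omega

-- _merge from Source B; the 'if b[1] < a[1]: a, b = b, a' swap becomes the two branches
def lmerge (a b : LHeap) : LHeap :=
  match a, b with
  | .leaf, b => b
  | a, .leaf => a
  | .node ka va la ra, .node kb vb lb rb =>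
    if vb < va then
      lmk vb lb (lmerge rb (.node ka va la ra))
    else
      lmk va la (lmerge ra (.node kb vb lb rb))
termination_by lsize a + lsize b
decreasing_by
  · exact lmerge_dec1 ka va la ra kb vb lb rb
  · exact lmerge_dec2 ka va la ra kb vb lb rb

-- Source B's h[1] / h[2] / h[3]; on .leaf Python raises TypeError (h is None) — the
-- defaults below are only reached outside Pre_ (empty input) or in states the
-- invariant n = element count makes unreachable.
def lval : LHeap → Int
  | .leaf => 0
  | .node _ v _ _ => v

def lleft : LHeap → LHeap
  | .leaf => .leaf
  | .node _ _ l _ => l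

def lright : LHeap → LHeap
  | .leaf => .leaf
  | .node _ _ _ r => r

-- Source B's while loop; n tracks the element count and bounds the iteration
def loopB (h : LHeap) (K : Int) (n : Int) (cnt : Int) : Int :=
  if lval h < K then
    if hn : n < 2 then -1
    else
      let a := lval h
      let h1 := lmerge (lleft h) (lright h)
      let b := lval h1
      let h2 := lmerge (lleft h1) (lright h1)
      loopB (lmerge (.node 1 (a + 2 * b) .leaf .leaf) h2) K (n - 1) (cnt + 1)
  else cnt
termination_by n.toNat
decreasing_by omega

def solution_alt (scoville : List Int) (K : Int) : Int :=
  let h := scoville.foldl (fun h s => lmerge (.node 1 s .leaf .leaf) h) .leaf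
  loopB h K (scoville.length : Int) 0

-- ===== PRECONDITION & SPEC =====
-- Pre_ excludes exactly the empty list, where Python A raises IndexError on scoville[0].
def Pre_solution (scoville : List Int) (K : Int) : Prop := scoville ≠ []
instance (scoville : List Int) (K : Int) : Decidable (Pre_solution scoville K) := by
  unfold Pre_solution; infer_instance

def pvWitness_solution : List Int × Int := ([1, 2, 3, 9, 10, 12], 7)

def Spec_solution (scoville : List Int) (K : Int) (out : Int) : Prop := out = solution_alt scoville K
instance (scoville : List Int) (K : Int) (out : Int) : Decidable (Spec_solution scoville K out) := by
  unfold Spec_solution; infer_instance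

-- ===== CLAIM (what is proved, stated in full; the proofs are below) =====
def Claim_equal_solution : Prop := ∀ (scoville : List Int) (K : Int), Dom_solution scoville K → Pre_solution scoville K → Spec_solution scoville K (solution scoville K)

-- ===== LEMMAS AND PROOFS =====

def toL : LHeap → List Int
  | .leaf => []
  | .node _ v l r => v :: (toL l ++ toL r)

def heapOrd : LHeap → Prop
  | .leaf => True
  | .node _ v l r => (∀ y ∈ toL l ++ toL r, v ≤ y) ∧ heapOrd l ∧ heapOrd r

theorem heapOrd_node (k v : Int) (l r : LHeap) :
    heapOrd (.node k v l r) ↔ (∀ y ∈ toL l ++ toL r, v ≤ y) ∧ heapOrd l ∧ heapOrd r := Iff.rfl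

theorem toL_lmk (v : Int) (l r : LHeap) : (toL (lmk v l r)).Perm (v :: (toL l ++ toL r)) := by
  unfold lmk; split
  · exact List.Perm.cons v List.perm_append_comm
  · exact List.Perm.refl _

theorem lmerge_perm (a b : LHeap) : (toL (lmerge a b)).Perm (toL a ++ toL b) := by
  induction a, b using lmerge.induct with
  | case1 b => simp [lmerge, toL]
  | case2 a h =>
    cases a with
    | leaf => exact absurd rfl h
    | node ka va la ra => simp [lmerge, toL]
  | case3 ka va la ra kb vb lb rb hlt ih =>
    rw [lmerge, if_pos hlt]
    refine List.perm_iff_count.mpr (fun z => ?_)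
    have h1 := (toL_lmk vb lb (lmerge rb (.node ka va la ra))).count_eq z
    have h2 := ih.count_eq z
    simp only [toL, List.count_append, List.count_cons] at h1 h2 ⊢
    omega
  | case4 ka va la ra kb vb lb rb hlt ih =>
    rw [lmerge, if_neg hlt]
    refine List.perm_iff_count.mpr (fun z => ?_)
    have h1 := (toL_lmk va la (lmerge ra (.node kb vb lb rb))).count_eq z
    have h2 := ih.count_eq z
    simp only [toL, List.count_append, List.count_cons] at h1 h2 ⊢
    omega

theorem lmerge_ord (a b : LHeap) : heapOrd a → heapOrd b → heapOrd (lmerge a b) := by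
  induction a, b using lmerge.induct with
  | case1 b => intro _ hb; simpa [lmerge] using hb
  | case2 a h =>
    cases a with
    | leaf => exact absurd rfl h
    | node ka va la ra => intro ha _; simpa [lmerge] using ha
  | case3 ka va la ra kb vb lb rb hlt ih =>
    intro ha hb
    rw [lmerge, if_pos hlt]
    rw [heapOrd_node] at ha hb
    obtain ⟨hva, hla, hra⟩ := ha
    obtain ⟨hvb, hlb, hrb⟩ := hb
    have hm := ih hrb ((heapOrd_node ka va la ra).mpr ⟨hva, hla, hra⟩)
    have hbound : ∀ y ∈ toL lb ++ toL (lmerge rb (.node ka va la ra)), vb ≤ y := by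
      intro y hy
      rcases List.mem_append.mp hy with hy | hy
      · exact hvb y (List.mem_append.mpr (Or.inl hy))
      · have hy' := (lmerge_perm rb (.node ka va la ra)).mem_iff.mp hy
        rcases List.mem_append.mp hy' with hy2 | hy2
        · exact hvb y (List.mem_append.mpr (Or.inr hy2))
        · simp only [toL, List.mem_cons, List.mem_append] at hy2
          rcases hy2 with rfl | hy3 | hy3
          · exact le_of_lt hlt
          · exact le_trans (le_of_lt hlt) (hva y (List.mem_append.mpr (Or.inl hy3)))
          · exact le_trans (le_of_lt hlt) (hva y (List.mem_append.mpr (Or.inr hy3)))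
    unfold lmk; split
    · rw [heapOrd_node]
      exact ⟨fun y hy => hbound y (List.mem_append.mpr (List.mem_append.mp hy).symm), hm, hlb⟩
    · rw [heapOrd_node]
      exact ⟨hbound, hlb, hm⟩
  | case4 ka va la ra kb vb lb rb hlt ih =>
    intro ha hb
    rw [lmerge, if_neg hlt]
    rw [Int.not_lt] at hlt
    rw [heapOrd_node] at ha hb
    obtain ⟨hva, hla, hra⟩ := ha
    obtain ⟨hvb, hlb, hrb⟩ := hb
    have hm := ih hra ((heapOrd_node kb vb lb rb).mpr ⟨hvb, hlb, hrb⟩)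
    have hbound : ∀ y ∈ toL la ++ toL (lmerge ra (.node kb vb lb rb)), va ≤ y := by
      intro y hy
      rcases List.mem_append.mp hy with hy | hy
      · exact hva y (List.mem_append.mpr (Or.inl hy))
      · have hy' := (lmerge_perm ra (.node kb vb lb rb)).mem_iff.mp hy
        rcases List.mem_append.mp hy' with hy2 | hy2
        · exact hva y (List.mem_append.mpr (Or.inr hy2))
        · simp only [toL, List.mem_cons, List.mem_append] at hy2
          rcases hy2 with rfl | hy3 | hy3
          · exact hlt
          · exact le_trans hlt (hvb y (List.mem_append.mpr (Or.inl hy3)))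
          · exact le_trans hlt (hvb y (List.mem_append.mpr (Or.inr hy3)))
    unfold lmk; split
    · rw [heapOrd_node]
      exact ⟨fun y hy => hbound y (List.mem_append.mpr (List.mem_append.mp hy).symm), hm, hla⟩
    · rw [heapOrd_node]
      exact ⟨hbound, hla, hm⟩

-- equal heads of permuted lists when each head is a lower bound of its own list
theorem min_head_eq (v x : Int) (t1 t2 : List Int)
    (hp : (v :: t1).Perm (x :: t2))
    (h1 : ∀ y ∈ v :: t1, v ≤ y) (h2 : ∀ y ∈ x :: t2, x ≤ y) : v = x := by
  have hv : v ∈ x :: t2 := hp.mem_iff.mp List.mem_cons_self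
  have hx : x ∈ v :: t1 := hp.symm.mem_iff.mp List.mem_cons_self
  exact le_antisymm (h1 x hx) (h2 v hv)

theorem heapOrd_root (k v : Int) (l r : LHeap) (h : heapOrd (.node k v l r)) :
    ∀ y ∈ toL (.node k v l r), v ≤ y := by
  intro y hy
  simp only [toL, List.mem_cons] at hy
  rcases hy with rfl | hy
  · exact le_refl y
  · exact ((heapOrd_node k v l r).mp h).1 y hy

theorem loops_eq (m : Nat) : ∀ (xs : List Int) (h : LHeap) (n cnt K : Int),
    xs ≠ [] → xs.length ≤ m → xs.Pairwise (· ≤ ·) → (toL h).Perm xs → heapOrd h →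
    n = (xs.length : Int) → loopB h K n cnt = solutionLoopA xs K cnt := by
  induction m with
  | zero =>
    intro xs h n cnt K hne hlen _ _ _ _
    exact absurd (List.length_eq_zero_iff.mp (Nat.le_zero.mp hlen)) hne
  | succ m ih =>
    intro xs h n cnt K hne hlen hsort hp hord hn
    match xs with
    | [] => exact absurd rfl hne
    | x :: rest =>
      cases h with
      | leaf => exact absurd hp.symm.eq_nil (by simp)
      | node k v l r =>
        have hvx : v = x := by
          refine min_head_eq v x (toL l ++ toL r) rest hp (heapOrd_root k v l r hord) ?_
          intro y hy
          rcases List.mem_cons.mp hy with rfl | hy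
          · exact le_refl y
          · exact (List.pairwise_cons.mp hsort).1 y hy
        match rest with
        | [] =>
          have hn1 : n < 2 := by
            simp only [List.length_cons, List.length_nil] at hn
            omega
          rw [loopB, solutionLoopA]
          simp only [lval, hvx, hn1, dif_pos]
          by_cases hx : x < K
          · rw [if_pos hx, if_pos hx]
            split <;> rfl
          · rw [if_neg hx, if_neg hx]
        | y :: rest2 =>
          rw [loopB, solutionLoopA]
          simp only [lval, lleft, lright, hvx]
          by_cases hx : x < K
          · rw [if_pos hx, if_pos hx]
            have hn2 : ¬ n < 2 := by
              have := hp.length_eq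
              simp only [List.length_cons] at hn
              omega
            rw [dif_neg hn2, if_neg (by simp : ¬ (x :: y :: rest2).length < 2)]
            have hp1 : (toL (lmerge l r)).Perm (y :: rest2) := by
              have hh : (v :: (toL l ++ toL r)).Perm (x :: (y :: rest2)) := hp
              rw [hvx] at hh
              exact (lmerge_perm l r).trans hh.cons_inv
            have hord1 : heapOrd (lmerge l r) :=
              lmerge_ord l r ((heapOrd_node k v l r).mp hord).2.1 ((heapOrd_node k v l r).mp hord).2.2
            rcases hq : lmerge l r with _ | ⟨k2, b, l2, r2⟩
            · rw [hq] at hp1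
              exact absurd hp1.symm.eq_nil (by simp)
            · rw [hq] at hp1 hord1
              have hby : b = y := by
                refine min_head_eq b y (toL l2 ++ toL r2) rest2 hp1 (heapOrd_root k2 b l2 r2 hord1) ?_
                intro z hz
                rcases List.mem_cons.mp hz with rfl | hz
                · exact le_refl z
                · exact (List.pairwise_cons.mp (List.pairwise_cons.mp hsort).2).1 z hz
              subst hby
              have hrest : (toL l2 ++ toL r2).Perm rest2 := by
                have hc : (b :: (toL l2 ++ toL r2)).Perm (b :: rest2) := hp1
                exact hc.cons_inv
              have hp2 : (toL (lmerge (.node 1 (x + 2 * b) .leaf .leaf) (lmerge l2 r2))).Perm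
                  ((x + b * 2) :: rest2) := by
                refine (lmerge_perm _ _).trans ?_
                have hx2 : x + 2 * b = x + b * 2 := by ring
                rw [hx2]
                simpa [toL] using ((lmerge_perm l2 r2).trans hrest).cons (x + b * 2)
              have hperm' : (toL (lmerge (.node 1 (x + 2 * b) .leaf .leaf) (lmerge l2 r2))).Perm
                  (PySem.List.sorted ((x + b * 2) :: rest2) (fun z => z) false) :=
                hp2.trans (PySem.List.sorted_perm ((x + b * 2) :: rest2) (fun z => z) false).symm
              refine ih _ _ (n - 1) (cnt + 1) K ?_ ?_ ?_ hperm' ?_ ?_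
              · rw [Ne, PySem.List.sorted_eq_nil_iff]; simp
              · rw [PySem.List.length_sorted]
                simp only [List.length_cons] at hlen ⊢
                omega
              · simpa using PySem.List.sorted_pairwise (xs := (x + b * 2) :: rest2) (key := fun z => z)
              · refine lmerge_ord _ _ ?_ (lmerge_ord l2 r2 ?_ ?_)
                · rw [heapOrd_node]; simp [toL, heapOrd]
                · exact ((heapOrd_node k2 b l2 r2).mp hord1).2.1
                · exact ((heapOrd_node k2 b l2 r2).mp hord1).2.2
              · rw [PySem.List.length_sorted]
                simp only [List.length_cons] at hn ⊢
                omega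
          · rw [if_neg hx, if_neg hx]

theorem build_heap (xs : List Int) : ∀ (h : LHeap), heapOrd h →
    heapOrd (xs.foldl (fun h s => lmerge (.node 1 s .leaf .leaf) h) h) ∧
    (toL (xs.foldl (fun h s => lmerge (.node 1 s .leaf .leaf) h) h)).Perm (toL h ++ xs) := by
  induction xs with
  | nil =>
    intro h hh
    refine ⟨by simpa using hh, ?_⟩
    simp
  | cons s xs ih =>
    intro h hh
    have hord' : heapOrd (lmerge (.node 1 s .leaf .leaf) h) :=
      lmerge_ord _ _ (by rw [heapOrd_node]; simp [toL, heapOrd]) hh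
    obtain ⟨h1, h2⟩ := ih (lmerge (.node 1 s .leaf .leaf) h) hord'
    refine ⟨by simpa using h1, ?_⟩
    simp only [List.foldl_cons]
    have e1 : (toL (lmerge (LHeap.node 1 s .leaf .leaf) h)).Perm (s :: toL h) := by
      simpa [toL] using lmerge_perm (LHeap.node 1 s .leaf .leaf) h
    refine h2.trans ?_
    refine (e1.append (List.Perm.refl xs)).trans ?_
    exact List.perm_middle.symm

-- ===== VERDICT (by name: the statement is the Claim_ definition above) =====
theorem solution_spec : Claim_equal_solution := by
  intro scoville K _ hpre
  unfold Spec_solution solution solution_alt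
  obtain ⟨hord, hperm⟩ := build_heap scoville .leaf trivial
  simp only [toL, List.nil_append] at hperm
  refine (loops_eq (PySem.List.sorted scoville (fun z => z) false).length _ _
    (scoville.length : Int) 0 K ?_ le_rfl ?_ ?_ hord ?_).symm
  · rw [Ne, PySem.List.sorted_eq_nil_iff]; exact hpre
  · simpa using PySem.List.sorted_pairwise (xs := scoville) (key := fun z => z)
  · exact hperm.trans (PySem.List.sorted_perm scoville (fun z => z) false).symm
  · rw [PySem.List.length_sorted]
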